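-- pv_equiv track=rewrite | github.com/lamperi/aoc | 2025/4/solve.py | find_accessible_rolls
-- ===== SOURCE A (Python) =====
-- def neigh(yx):
--     y, x = yx
--     yield y-1, x-1,
--     yield y-1, x
--     yield y-1, x+1
--     yield y, x-1
--     yield y, x+1
--     yield y+1, x-1,
--     yield y+1, x
--     yield y+1, x+1
--
-- def find_accessible_rolls(area):
--     accessible = set()
--     for yx, c in area.items():
--         if c != "@":
--             continue
--         rolls = 0
--         for nyx in neigh(yx):
--             n = area.get(nyx, None)
--             if n == "@":
--                 rolls += 1
--         if rolls < 4:
--             accessible.add(yx)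
--     return accessible
-- ===== SOURCE B (Python) =====
-- def neigh8(yx):
--     y, x = yx
--     return ((y-1, x-1), (y-1, x), (y-1, x+1), (y, x-1),
--             (y, x+1), (y+1, x-1), (y+1, x), (y+1, x+1))
--
-- def find_accessible_rolls(area):
--     at_cells = [yx for yx, c in area.items() if c == "@"]
--     scattered = [nyx for yx in at_cells for nyx in neigh8(yx)]
--     counts = {}
--     for nyx in scattered:
--         counts[nyx] = counts.get(nyx, 0) + 1
--     return {yx for yx in at_cells if counts.get(yx, 0) < 4}
-- ===== Notes on version B (the rewrite author's own statement) =====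
-- stated objective: alternative
-- what changed: B replaces A's per-cell gather (8 dict lookups around each '@' cell) with a scatter pass that builds a neighbor-count table from all '@' cells once, then filters the '@' cells by that table.
import Mathlib
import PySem

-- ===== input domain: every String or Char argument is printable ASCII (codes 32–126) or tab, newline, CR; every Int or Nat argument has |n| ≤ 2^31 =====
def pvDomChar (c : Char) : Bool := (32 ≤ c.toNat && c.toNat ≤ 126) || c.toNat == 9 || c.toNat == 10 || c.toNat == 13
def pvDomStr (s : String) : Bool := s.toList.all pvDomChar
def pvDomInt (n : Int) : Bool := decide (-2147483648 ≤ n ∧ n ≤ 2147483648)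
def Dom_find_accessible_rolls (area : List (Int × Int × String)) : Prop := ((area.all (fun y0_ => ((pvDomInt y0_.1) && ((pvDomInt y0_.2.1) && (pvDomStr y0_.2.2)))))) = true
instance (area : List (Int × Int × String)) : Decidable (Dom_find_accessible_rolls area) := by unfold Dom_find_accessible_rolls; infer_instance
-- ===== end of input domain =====

-- B builds the neighbor-count table once by scattering from every '@' cell, instead of A's
-- gathering of 8 lookups around each '@' cell; same cost, different traversal (objective: alternative).

-- ===== PORT A =====
-- neigh(yx): the 8 neighbor coordinates, in A's yield order (B reuses the same helper)
def pyNeigh (yx : Int × Int) : List (Int × Int) :=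
  [(yx.1 - 1, yx.2 - 1), (yx.1 - 1, yx.2), (yx.1 - 1, yx.2 + 1),
   (yx.1, yx.2 - 1), (yx.1, yx.2 + 1),
   (yx.1 + 1, yx.2 - 1), (yx.1 + 1, yx.2), (yx.1 + 1, yx.2 + 1)]

def find_accessible_rolls (area : List (Int × Int × String)) : List (Int × Int) :=
  let d : PySem.Dict (Int × Int) String :=
    PySem.Dict.ofList (area.map fun p => ((p.1, p.2.1), p.2.2))
  d.items.foldl (fun acc p =>
    if p.2 ≠ "@" then acc
    else
      let rolls : Int := (pyNeigh p.1).foldl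
        (fun r nyx => if d.get? nyx == some "@" then r + 1 else r) 0
      if rolls < 4 then PySem.Set.add acc p.1 else acc) []

-- ===== PORT B =====
def find_accessible_rolls_alt (area : List (Int × Int × String)) : List (Int × Int) :=
  let d : PySem.Dict (Int × Int) String :=
    PySem.Dict.ofList (area.map fun p => ((p.1, p.2.1), p.2.2))
  let atCells : List (Int × Int) := (d.items.filter (fun p => p.2 == "@")).map (·.1)
  let scattered : List (Int × Int) := atCells.flatMap pyNeigh
  let counts : PySem.Dict (Int × Int) Int :=
    scattered.foldl (fun c n => c.modify n 0 (· + 1)) PySem.Dict.empty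
  atCells.foldl (fun acc yx =>
    if counts.getD yx 0 < 4 then PySem.Set.add acc yx else acc) []

-- ===== PRECONDITION & SPEC =====
def Spec_find_accessible_rolls (area : List (Int × Int × String)) (out : List (Int × Int)) : Prop := out = find_accessible_rolls_alt area
instance (area : List (Int × Int × String)) (out : List (Int × Int)) : Decidable (Spec_find_accessible_rolls area out) := by unfold Spec_find_accessible_rolls; infer_instance

-- ===== CLAIM (what is proved, stated in full; the proofs are below) =====
def Claim_equal_find_accessible_rolls : Prop := ∀ (area : List (Int × Int × String)), Dom_find_accessible_rolls area → Spec_find_accessible_rolls area (find_accessible_rolls area)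

-- ===== LEMMAS AND PROOFS =====

-- count of yx in the neighbor list of z: 1 exactly when z is itself a neighbor of yx (symmetry)
theorem count_pyNeigh (z yx : Int × Int) :
    (pyNeigh z).count yx = if z ∈ pyNeigh yx then 1 else 0 := by
  obtain ⟨a, b⟩ := z; obtain ⟨c, d⟩ := yx
  simp only [pyNeigh, List.count_cons, List.count_nil, List.mem_cons, List.not_mem_nil,
    or_false, Prod.mk.injEq, beq_iff_eq]
  split_ifs <;> omega

theorem nodup_pyNeigh (yx : Int × Int) : (pyNeigh yx).Nodup := by
  obtain ⟨a, b⟩ := yx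
  simp [pyNeigh, Prod.ext_iff]
  omega

theorem count_flatMap_eq_sum {α β : Type} [BEq β] (l : List α) (f : α → List β) (b : β) :
    (l.flatMap f).count b = (l.map fun a => (f a).count b).sum := by
  induction l with
  | nil => simp
  | cons x xs ih => simp [List.count_append, ih]

theorem sum_map_ite_eq_length_filter {α : Type} (l : List α) (p : α → Prop) [DecidablePred p] :
    (l.map fun a => if p a then 1 else 0).sum = (l.filter (fun a => decide (p a))).length := by
  induction l with
  | nil => simp
  | cons x xs ih => by_cases h : p x <;> simp [h, ih, Nat.add_comm]

-- A's inner gather loop counts the neighbors whose dict value is "@"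
theorem gather_eq_length_filter (d : PySem.Dict (Int × Int) String) (yx : Int × Int) :
    (pyNeigh yx).foldl (fun r nyx => if d.get? nyx == some "@" then r + 1 else r) (0 : Int)
      = (((pyNeigh yx).filter (fun n => d.get? n == some "@")).length : Int) := by
  rw [PySem.List.foldl_count_if]
  simp [List.countP_eq_length_filter]

-- two nodup lists: filtering each by membership in the other gives the same length
theorem length_filter_mem_comm (l m : List (Int × Int)) (hl : l.Nodup) (hm : m.Nodup) :
    (l.filter (fun z => decide (z ∈ m))).length = (m.filter (fun z => decide (z ∈ l))).length := by
  rw [← List.toFinset_card_of_nodup (hl.filter _),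
      ← List.toFinset_card_of_nodup (hm.filter _),
      List.toFinset_filter, List.toFinset_filter]
  congr 1
  ext x
  simp only [Finset.mem_filter, List.mem_toFinset, decide_eq_true_eq]
  constructor <;> exact fun ⟨h1, h2⟩ => ⟨h2, h1⟩

-- the central fact: the scatter count at yx equals A's gather count at yx, for ANY coordinate
theorem scatter_eq_gather (d : PySem.Dict (Int × Int) String) (hnd : d.keys.Nodup)
    (yx : Int × Int) :
    (((d.items.filter (fun p => p.2 == "@")).map (·.1)).flatMap pyNeigh).count yx
      = ((pyNeigh yx).filter (fun n => d.get? n == some "@")).length := by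
  set atCells := (d.items.filter (fun p => p.2 == "@")).map (·.1) with hat
  have hatnd : atCells.Nodup :=
    hnd.sublist (List.Sublist.map _ List.filter_sublist)
  have hmem : ∀ z : Int × Int, z ∈ atCells ↔ d.get? z = some "@" := by
    intro z
    constructor
    · intro hz
      rw [hat] at hz
      simp only [List.mem_map, List.mem_filter] at hz
      obtain ⟨p, ⟨hp, hv⟩, he⟩ := hz
      have hpz : p = (z, "@") := by
        obtain ⟨p1, p2⟩ := p
        simp only [beq_iff_eq] at hv
        simp only at he
        simp [hv, he]
      rw [hpz] at hp
      exact PySem.Dict.get?_of_mem_items d hp hnd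
    · intro hz
      have hit := PySem.Dict.mem_items_of_get?_eq_some d hz
      rw [hat]
      simp only [List.mem_map, List.mem_filter]
      exact ⟨(z, "@"), ⟨hit, by simp⟩, rfl⟩
  rw [count_flatMap_eq_sum]
  have h1 : atCells.map (fun z => (pyNeigh z).count yx)
      = atCells.map (fun z => if z ∈ pyNeigh yx then 1 else 0) :=
    List.map_congr_left (fun z _ => count_pyNeigh z yx)
  rw [h1, sum_map_ite_eq_length_filter,
      length_filter_mem_comm _ _ hatnd (nodup_pyNeigh yx)]
  congr 1
  apply List.filter_congr
  intro n _
  rw [Bool.eq_iff_iff]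
  simp [hmem n]

-- counts.getD yx 0 in B's port equals the scatter count
theorem getD_counts (scattered : List (Int × Int)) (yx : Int × Int) :
    (scattered.foldl (fun c n => c.modify n 0 (· + 1))
        (PySem.Dict.empty : PySem.Dict (Int × Int) Int)).getD yx 0
      = (scattered.count yx : Int) := by
  rw [PySem.Dict.getD_foldl_modify_add_one]
  simp

-- ===== VERDICT (by name: the statement is the Claim_ definition above) =====
theorem find_accessible_rolls_spec : Claim_equal_find_accessible_rolls := by
  intro area _
  unfold Spec_find_accessible_rolls find_accessible_rolls find_accessible_rolls_alt
  set d : PySem.Dict (Int × Int) String :=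
    PySem.Dict.ofList (area.map fun p => ((p.1, p.2.1), p.2.2)) with hd
  have hnd : d.keys.Nodup := PySem.Dict.nodup_keys_ofList _
  have step1 : ∀ (acc : List (Int × Int)) (p : (Int × Int) × String),
      (if p.2 ≠ "@" then acc
       else if (pyNeigh p.1).foldl
          (fun r nyx => if d.get? nyx == some "@" then r + 1 else r) (0 : Int) < 4
        then PySem.Set.add acc p.1 else acc)
      = (if (p.2 == "@" : Bool)
         then (if ((((d.items.filter (fun q => q.2 == "@")).map (·.1)).flatMap pyNeigh).foldl
                (fun c n => c.modify n 0 (· + 1))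
                (PySem.Dict.empty : PySem.Dict (Int × Int) Int)).getD p.1 0 < 4
               then PySem.Set.add acc p.1 else acc)
         else acc) := by
    intro acc p
    rw [gather_eq_length_filter, getD_counts, scatter_eq_gather d hnd p.1]
    by_cases h : p.2 = "@" <;> simp [h]
  rw [PySem.List.foldl_congr_mem _ _ _ _ (fun acc p _ => step1 acc p)]
  simp only [List.foldl_map, List.foldl_filter]
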